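-- pv_equiv track=rewrite | github.com/zhenlu1936/ASPLOSer | backend/visualization.py | _next_legend_id
-- ===== SOURCE A (Python) =====
-- def _next_legend_id(existing_ids: set[str], suffix: str) -> str:
--     base = f"legend-{suffix}"
--     if base not in existing_ids:
--         existing_ids.add(base)
--         return base
--
--     index = 1
--     while True:
--         candidate = f"{base}-{index}"
--         if candidate not in existing_ids:
--             existing_ids.add(candidate)
--             return candidate
--         index += 1
-- ===== SOURCE B (Python) =====
-- def _next_legend_id(existing_ids: set[str], suffix: str) -> str:
--     base = f"legend-{suffix}"
--     if base not in existing_ids: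
--         existing_ids.add(base)
--         return base
--     prefix = base + "-"
--     tails = sorted({s[len(prefix):] for s in existing_ids if s.startswith(prefix)},
--                    key=lambda t: (len(t), t))
--     index = 1
--     for t in tails:
--         if t == str(index):
--             index += 1
--     candidate = prefix + str(index)
--     existing_ids.add(candidate)
--     return candidate
-- ===== Notes on version B (the rewrite author's own statement) =====
-- stated objective: alternative
-- what changed: A probes the set with candidate after candidate (base, base-1, base-2, ...) until one is free; B never probes: it collects the tails of ids starting with 'legend-<suffix>-', sorts them numerically by the key (len(t), t), and computes the first unused index by a single gap scan over that sorted list.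
import Mathlib
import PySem

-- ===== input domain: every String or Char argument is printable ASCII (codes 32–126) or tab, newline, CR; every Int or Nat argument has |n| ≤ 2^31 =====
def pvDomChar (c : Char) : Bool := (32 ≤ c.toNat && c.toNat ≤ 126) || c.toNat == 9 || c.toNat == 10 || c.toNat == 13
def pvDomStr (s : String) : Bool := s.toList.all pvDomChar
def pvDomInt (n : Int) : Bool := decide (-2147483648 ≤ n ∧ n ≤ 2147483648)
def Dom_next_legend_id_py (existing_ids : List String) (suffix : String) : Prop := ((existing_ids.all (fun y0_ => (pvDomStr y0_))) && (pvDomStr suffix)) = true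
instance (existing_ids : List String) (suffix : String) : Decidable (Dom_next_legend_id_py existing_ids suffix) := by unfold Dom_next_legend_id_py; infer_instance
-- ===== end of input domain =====

-- B replaces A's probe-candidate-after-candidate search by a sort-then-scan: it collects the
-- tails of the ids starting with "legend-<suffix>-", sorts them numerically via the key
-- (len(t), t) and finds the first unused index by one gap scan (objective: alternative).
-- Python A and B both ADD the returned id to the argument set; the equivalence proved here is
-- about the RETURN value (the mutation is identical in both Pythons).

-- ===== PORT A =====
-- A's 'while True' always returns: among the first existing_ids.length + 1 candidate strings one
-- is not in the list (candidates are pairwise distinct; pigeonhole, proved below), so fuel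
-- existing_ids.length + 1 makes the 0-fuel branch unreachable; the loop body is A's, step for step.
def nextLoopA (ids : List String) (base : String) (index : Int) : Nat → String
  | 0 => ""
  | fuel+1 =>
    let candidate := base ++ "-" ++ PySem.Int.toStr index
    if ids.contains candidate then nextLoopA ids base (index+1) fuel else candidate

def next_legend_id_py (existing_ids : List String) (suffix : String) : String :=
  let base := "legend-" ++ suffix
  if !(existing_ids.contains base) then base
  else nextLoopA existing_ids base 1 (existing_ids.length + 1)

-- ===== PORT B =====
-- Source B sorts the set comprehension with key=lambda t: (len(t), t); the key is injective in t,
-- so the sorted result does not depend on the Python set's iteration order (exact per PySem's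
-- Set rules); the tuple key is ported with PySem.List.sorted2, the for-loop as its foldl.
def next_legend_id_py_alt (existing_ids : List String) (suffix : String) : String :=
  let base := "legend-" ++ suffix
  if !(existing_ids.contains base) then base
  else
    let p := base ++ "-"
    let tails : List String :=
      PySem.List.sorted2
        (PySem.Set.ofList ((existing_ids.filter (fun s => PySem.Str.startswith s p)).map
          (fun s => PySem.Str.slice s (some (PySem.Str.len p)) none)))
        (fun t => PySem.Str.len t) (fun t => t)
    let index := tails.foldl (fun idx t => if t = PySem.Int.toStr idx then idx + 1 else idx) (1 : Int)
    p ++ PySem.Int.toStr index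

-- ===== PRECONDITION & SPEC =====
def Spec_next_legend_id_py (existing_ids : List String) (suffix : String) (out : String) : Prop := out = next_legend_id_py_alt existing_ids suffix
instance (existing_ids : List String) (suffix : String) (out : String) : Decidable (Spec_next_legend_id_py existing_ids suffix out) := by unfold Spec_next_legend_id_py; infer_instance

-- ===== CLAIM (what is proved, stated in full; the proofs are below) =====
def Claim_equal_next_legend_id_py : Prop := ∀ (existing_ids : List String) (suffix : String), Dom_next_legend_id_py existing_ids suffix → Spec_next_legend_id_py existing_ids suffix (next_legend_id_py existing_ids suffix)

-- ===== LEMMAS AND PROOFS =====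

-- decimal value of a digit string: the tool used to compare decimal representations
def pvDigitVal (c : Char) : Nat := c.toNat - 48
def pvVal (l : List Char) : Nat := l.foldl (fun a c => a * 10 + pvDigitVal c) 0
def pvIsDigit (c : Char) : Prop := 48 ≤ c.toNat ∧ c.toNat ≤ 57

lemma pvVal_foldl (l : List Char) (a : Nat) :
    l.foldl (fun a c => a * 10 + pvDigitVal c) a = a * 10 ^ l.length + pvVal l := by
  induction l generalizing a with
  | nil => simp [pvVal]
  | cons c l ih =>
    simp only [List.foldl_cons, List.length_cons, pvVal] at *
    rw [ih (a * 10 + pvDigitVal c), ih (0 * 10 + pvDigitVal c)]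
    ring

lemma pvVal_cons (c : Char) (t : List Char) :
    pvVal (c :: t) = pvDigitVal c * 10 ^ t.length + pvVal t := by
  simp only [pvVal, List.foldl_cons, Nat.zero_mul, Nat.zero_add]
  exact pvVal_foldl t (pvDigitVal c)

lemma pvDigitVal_digitChar (d : Nat) (h : d < 10) : pvDigitVal (Nat.digitChar d) = d := by
  interval_cases d <;> rfl

lemma digitChar_isDigit (d : Nat) (h : d < 10) : pvIsDigit (Nat.digitChar d) := by
  interval_cases d <;> exact ⟨by decide, by decide⟩

lemma pvVal_toDigitsCore (f : Nat) : ∀ (n : Nat) (acc : List Char), n < f →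
    pvVal (Nat.toDigitsCore 10 f n acc) = n * 10 ^ acc.length + pvVal acc := by
  induction f with
  | zero => intro n acc h; omega
  | succ f ih =>
    intro n acc h
    rw [Nat.toDigitsCore]
    by_cases h0 : n / 10 = 0
    · rw [if_pos h0]
      have hn : n < 10 := by omega
      have : pvVal (Nat.digitChar (n % 10) :: acc) = (n % 10) * 10 ^ acc.length + pvVal acc := by
        rw [pvVal_cons, pvDigitVal_digitChar (n % 10) (Nat.mod_lt _ (by omega))]
      rw [this]
      have : n % 10 = n := Nat.mod_eq_of_lt hn
      rw [this]
    · simp only [if_neg h0]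
      have h10 : 10 ≤ n := by
        by_contra hlt
        exact h0 (Nat.div_eq_of_lt (by omega))
      have hrec : n / 10 < f := by
        have := Nat.div_lt_self (by omega : 0 < n) (by omega : 1 < 10)
        omega
      rw [ih (n / 10) (Nat.digitChar (n % 10) :: acc) hrec]
      have hd : pvVal (Nat.digitChar (n % 10) :: acc) = (n % 10) * 10 ^ acc.length + pvVal acc := by
        rw [pvVal_cons, pvDigitVal_digitChar (n % 10) (Nat.mod_lt _ (by omega))]
      rw [hd]
      simp only [List.length_cons]
      have hnm : 10 * (n / 10) + n % 10 = n := Nat.div_add_mod n 10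
      calc n / 10 * 10 ^ (acc.length + 1) + (n % 10 * 10 ^ acc.length + pvVal acc)
          = (10 * (n / 10) + n % 10) * 10 ^ acc.length + pvVal acc := by ring
        _ = n * 10 ^ acc.length + pvVal acc := by rw [hnm]

lemma pvVal_toDigits (n : Nat) : pvVal (Nat.toDigits 10 n) = n := by
  have := pvVal_toDigitsCore (n + 1) n [] (by omega)
  simpa [Nat.toDigits, pvVal] using this

lemma toStr_inj {i j : Int} (hi : 0 ≤ i) (hj : 0 ≤ j)
    (h : PySem.Int.toStr i = PySem.Int.toStr j) : i = j := by
  have h' : PySem.Int.toChars i = PySem.Int.toChars j := by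
    rw [← PySem.Int.toList_toStr, ← PySem.Int.toList_toStr, h]
  simp only [PySem.Int.toChars, if_neg (by omega : ¬ i < 0), if_neg (by omega : ¬ j < 0)] at h'
  have := congrArg pvVal h'
  rw [pvVal_toDigits, pvVal_toDigits] at this
  omega

-- structure of the decimal digit list: nonempty, all digits, leading digit nonzero for n ≥ 1
lemma toDigitsCore_struct (f : Nat) : ∀ (n : Nat) (acc : List Char), n < f →
    ∃ c t, Nat.toDigitsCore 10 f n acc = (c :: t) ++ acc ∧
      (∀ d ∈ c :: t, pvIsDigit d) ∧ (1 ≤ n → 1 ≤ pvDigitVal c) := by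
  induction f with
  | zero => intro n acc h; omega
  | succ f ih =>
    intro n acc h
    rw [Nat.toDigitsCore]
    by_cases h0 : n / 10 = 0
    · rw [if_pos h0]
      refine ⟨Nat.digitChar (n % 10), [], rfl, ?_, ?_⟩
      · intro d hd
        simp only [List.mem_cons, List.not_mem_nil, or_false] at hd
        subst hd
        exact digitChar_isDigit _ (Nat.mod_lt _ (by omega))
      · intro h1
        have hn : n < 10 := by omega
        have hm : n % 10 = n := Nat.mod_eq_of_lt hn
        rw [hm]
        interval_cases n <;> exact (by decide)
    · rw [if_neg h0]
      have h10 : 10 ≤ n := by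
        by_contra hlt
        exact h0 (Nat.div_eq_of_lt (by omega))
      have hrec : n / 10 < f := by
        have := Nat.div_lt_self (by omega : 0 < n) (by omega : 1 < 10)
        omega
      obtain ⟨c, t, heq, hdig, hhd⟩ := ih (n / 10) (Nat.digitChar (n % 10) :: acc) hrec
      refine ⟨c, t ++ [Nat.digitChar (n % 10)], ?_, ?_, ?_⟩
      · rw [heq]; simp
      · intro d hd
        simp only [List.mem_cons, List.mem_append, List.not_mem_nil, or_false] at hd
        rcases hd with rfl | hd | rfl
        · exact hdig _ (List.mem_cons_self)
        · exact hdig d (List.mem_cons_of_mem _ hd)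
        · exact digitChar_isDigit _ (Nat.mod_lt _ (by omega))
      · intro _
        exact hhd (by omega)

lemma toDigits_struct (n : Nat) :
    ∃ c t, Nat.toDigits 10 n = c :: t ∧ (∀ d ∈ c :: t, pvIsDigit d) ∧
      (1 ≤ n → 1 ≤ pvDigitVal c) := by
  obtain ⟨c, t, heq, hdig, hhd⟩ := toDigitsCore_struct (n + 1) n [] (by omega)
  exact ⟨c, t, by simpa [Nat.toDigits] using heq, hdig, hhd⟩

lemma pvVal_lt_pow (l : List Char) (h : ∀ c ∈ l, pvIsDigit c) :
    pvVal l < 10 ^ l.length := by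
  induction l with
  | nil => simp [pvVal]
  | cons c t ih =>
    rw [pvVal_cons, List.length_cons, pow_succ]
    have hc : pvDigitVal c ≤ 9 := by
      have := h c List.mem_cons_self
      unfold pvIsDigit at this
      unfold pvDigitVal
      omega
    have ht := ih (fun d hd => h d (List.mem_cons_of_mem _ hd))
    nlinarith [pow_pos (by omega : 0 < 10) t.length]

lemma pow_le_pvVal (c : Char) (t : List Char) (hc : 1 ≤ pvDigitVal c) :
    10 ^ t.length ≤ pvVal (c :: t) := by
  rw [pvVal_cons]
  calc 10 ^ t.length = 1 * 10 ^ t.length := (one_mul _).symm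
    _ ≤ pvDigitVal c * 10 ^ t.length := Nat.mul_le_mul_right _ hc
    _ ≤ pvDigitVal c * 10 ^ t.length + pvVal t := Nat.le_add_right _ _

-- on equal-length digit lists, the numeric order is the lexicographic one
lemma lex_of_val_lt : ∀ (l₁ l₂ : List Char), (∀ c ∈ l₁, pvIsDigit c) → (∀ c ∈ l₂, pvIsDigit c) →
    l₁.length = l₂.length → pvVal l₁ < pvVal l₂ → List.Lex (· < ·) l₁ l₂ := by
  intro l₁
  induction l₁ with
  | nil =>
    intro l₂ _ _ hlen hval
    cases l₂ with
    | nil => simp [pvVal] at hval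
    | cons c t => simp at hlen
  | cons c₁ t₁ ih =>
    intro l₂ h₁ h₂ hlen hval
    cases l₂ with
    | nil => simp at hlen
    | cons c₂ t₂ =>
      simp only [List.length_cons, Nat.add_right_cancel_iff] at hlen
      have hd₁ := h₁ c₁ List.mem_cons_self
      have hd₂ := h₂ c₂ List.mem_cons_self
      rcases Nat.lt_trichotomy (pvDigitVal c₁) (pvDigitVal c₂) with hlt | heq | hgt
      · apply List.Lex.rel
        have : c₁.toNat < c₂.toNat := by
          unfold pvIsDigit at hd₁ hd₂
          unfold pvDigitVal at hlt
          omega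
        rw [Char.lt_def]
        exact UInt32.lt_iff_toNat_lt.mpr this
      · have hceq : c₁ = c₂ := by
          have ht : c₁.toNat = c₂.toNat := by
            unfold pvIsDigit at hd₁ hd₂
            unfold pvDigitVal at heq
            omega
          exact Char.ext (UInt32.toNat_inj.mp ht)
        subst hceq
        apply List.Lex.cons
        apply ih t₂ (fun d hd => h₁ d (List.mem_cons_of_mem _ hd))
          (fun d hd => h₂ d (List.mem_cons_of_mem _ hd)) hlen
        rw [pvVal_cons, pvVal_cons, hlen] at hval
        exact Nat.lt_of_add_lt_add_left hval
      · exfalso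
        have hub := pvVal_lt_pow t₂ (fun d hd => h₂ d (List.mem_cons_of_mem _ hd))
        rw [pvVal_cons, pvVal_cons, hlen] at hval
        nlinarith [pow_pos (by omega : 0 < 10) t₂.length]

-- decimal monotonicity for the Python sort key (len(t), t)
lemma key_mono (a b : Int) (ha : 1 ≤ a) (hab : a < b) :
    (toLex (PySem.Str.len (PySem.Int.toStr a), PySem.Int.toStr a) : Lex (Int × String))
      < toLex (PySem.Str.len (PySem.Int.toStr b), PySem.Int.toStr b) := by
  have hca : PySem.Int.toChars a = Nat.toDigits 10 a.toNat := by
    simp [PySem.Int.toChars, if_neg (by omega : ¬ a < 0)]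
  have hcb : PySem.Int.toChars b = Nat.toDigits 10 b.toNat := by
    simp [PySem.Int.toChars, if_neg (by omega : ¬ b < 0)]
  obtain ⟨c₁, t₁, he₁, hdig₁, hhd₁⟩ := toDigits_struct a.toNat
  obtain ⟨c₂, t₂, he₂, hdig₂, hhd₂⟩ := toDigits_struct b.toNat
  have hva : pvVal (c₁ :: t₁) = a.toNat := by rw [← he₁]; exact pvVal_toDigits _
  have hvb : pvVal (c₂ :: t₂) = b.toNat := by rw [← he₂]; exact pvVal_toDigits _
  have hvlt : pvVal (c₁ :: t₁) < pvVal (c₂ :: t₂) := by rw [hva, hvb]; omega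
  have hla : (PySem.Int.toStr a).toList = c₁ :: t₁ := by
    rw [PySem.Int.toList_toStr, hca, he₁]
  have hlb : (PySem.Int.toStr b).toList = c₂ :: t₂ := by
    rw [PySem.Int.toList_toStr, hcb, he₂]
  have hlena : PySem.Str.len (PySem.Int.toStr a) = ((c₁ :: t₁).length : Int) := by
    rw [PySem.Str.len_eq, hla]
  have hlenb : PySem.Str.len (PySem.Int.toStr b) = ((c₂ :: t₂).length : Int) := by
    rw [PySem.Str.len_eq, hlb]
  rw [Prod.Lex.toLex_lt_toLex]
  show PySem.Str.len (PySem.Int.toStr a) < PySem.Str.len (PySem.Int.toStr b)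
      ∨ PySem.Str.len (PySem.Int.toStr a) = PySem.Str.len (PySem.Int.toStr b)
        ∧ PySem.Int.toStr a < PySem.Int.toStr b
  rcases Nat.lt_trichotomy (c₁ :: t₁).length (c₂ :: t₂).length with hlt | heq | hgt
  · left
    rw [hlena, hlenb]
    exact_mod_cast hlt
  · right
    constructor
    · rw [hlena, hlenb, heq]
    · rw [String.lt_iff_toList_lt, hla, hlb]
      exact lex_of_val_lt _ _ hdig₁ hdig₂ heq hvlt
  · exfalso
    have h1 : 10 ^ t₁.length ≤ pvVal (c₁ :: t₁) :=
      pow_le_pvVal c₁ t₁ (hhd₁ (by omega))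
    have h2 : pvVal (c₂ :: t₂) < 10 ^ (c₂ :: t₂).length := pvVal_lt_pow _ hdig₂
    have h3 : 10 ^ (c₂ :: t₂).length ≤ 10 ^ t₁.length := by
      apply Nat.pow_le_pow_right (by omega)
      simp only [List.length_cons] at hgt ⊢
      omega
    omega

-- B's gap scan over a list whose numeric elements appear in increasing order computes the
-- least unused index ≥ the start index
lemma scan_props : ∀ (L : List String) (i : Int), 1 ≤ i →
    L.Pairwise (fun s t => ∀ a b : Int, 1 ≤ a → 1 ≤ b →
      s = PySem.Int.toStr a → t = PySem.Int.toStr b → a < b) →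
    (∀ a : Int, 1 ≤ a → a < i → PySem.Int.toStr a ∉ L) →
    i ≤ L.foldl (fun idx t => if t = PySem.Int.toStr idx then idx + 1 else idx) i ∧
    PySem.Int.toStr (L.foldl (fun idx t => if t = PySem.Int.toStr idx then idx + 1 else idx) i) ∉ L ∧
    (∀ a : Int, i ≤ a → a < L.foldl (fun idx t => if t = PySem.Int.toStr idx then idx + 1 else idx) i →
      PySem.Int.toStr a ∈ L) := by
  intro L
  induction L with
  | nil =>
    intro i hi _ _
    refine ⟨le_refl _, by simp, ?_⟩
    intro a h1 h2
    simp only [List.foldl_nil] at h2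
    omega
  | cons t L ih =>
    intro i hi hpw hlow
    have hhead : ∀ x ∈ L, ∀ a b : Int, 1 ≤ a → 1 ≤ b →
        t = PySem.Int.toStr a → x = PySem.Int.toStr b → a < b :=
      fun x hx => (List.pairwise_cons.mp hpw).1 x hx
    have hpwL := (List.pairwise_cons.mp hpw).2
    simp only [List.foldl_cons]
    by_cases h : t = PySem.Int.toStr i
    · rw [if_pos h]
      have hlow' : ∀ a : Int, 1 ≤ a → a < i + 1 → PySem.Int.toStr a ∉ L := by
        intro a ha hlt hm
        rcases lt_or_eq_of_le (by omega : a ≤ i) with hai | hai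
        · exact hlow a ha hai (List.mem_cons_of_mem _ hm)
        · subst hai
          exact absurd (hhead _ hm a a ha ha h rfl) (by omega)
      obtain ⟨h1, h2, h3⟩ := ih (i + 1) (by omega) hpwL hlow'
      refine ⟨by omega, ?_, ?_⟩
      · intro hm
        rcases List.mem_cons.mp hm with he | hm'
        · rw [h] at he
          have := toStr_inj (by omega) (by omega) he
          omega
        · exact h2 hm'
      · intro a hia hlt
        rcases lt_or_eq_of_le hia with hia' | hia'
        · exact List.mem_cons_of_mem _ (h3 a (by omega) hlt)
        · rw [← hia', ← h]
          exact List.mem_cons_self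
    · rw [if_neg h]
      have hlow' : ∀ a : Int, 1 ≤ a → a < i → PySem.Int.toStr a ∉ L :=
        fun a ha hlt hm => hlow a ha hlt (List.mem_cons_of_mem _ hm)
      obtain ⟨h1, h2, h3⟩ := ih i hi hpwL hlow'
      refine ⟨h1, ?_, fun a hia hlt => List.mem_cons_of_mem _ (h3 a hia hlt)⟩
      intro hm
      rcases List.mem_cons.mp hm with he | hm'
      · -- t is the decimal of the scan result r; then r > i, so toStr i ∈ L, and the
        -- increasing-order hypothesis forces r < i: contradiction
        have hri : L.foldl (fun idx t => if t = PySem.Int.toStr idx then idx + 1 else idx) i ≠ i := by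
          intro hri
          rw [hri] at he
          exact h he.symm
        have hmemi : PySem.Int.toStr i ∈ L := h3 i (le_refl _) (by omega)
        have := hhead _ hmemi
          (L.foldl (fun idx t => if t = PySem.Int.toStr idx then idx + 1 else idx) i) i
          (by omega) hi he.symm rfl
        omega
      · exact h2 hm'

-- Python's tuple key (len(t), t) is the lexicographic order on Int × String
lemma sorted2_eq_sorted_lex (xs : List String) :
    PySem.List.sorted2 xs (fun t => PySem.Str.len t) (fun t => t) false
      = PySem.List.sorted xs (fun t => (toLex (PySem.Str.len t, t) : Lex (Int × String))) false := by
  unfold PySem.List.sorted2 PySem.List.sorted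
  show List.foldl (fun acc x => PySem.List.insertBy
      (fun a b => decide (PySem.Str.len a < PySem.Str.len b) ||
        (!decide (PySem.Str.len b < PySem.Str.len a) && decide (a < b))) x acc) [] xs
    = List.foldl (fun acc x => PySem.List.insertBy
      (fun a b => decide ((toLex (PySem.Str.len a, a) : Lex (Int × String))
        < toLex (PySem.Str.len b, b))) x acc) [] xs
  congr 1
  funext acc x
  congr 1
  funext a b
  simp only [Prod.Lex.toLex_lt_toLex, PySem.Str.len_eq, Nat.cast_lt, Nat.cast_inj,
    String.lt_iff_toList_lt]
  rcases Nat.lt_trichotomy a.length b.length with h | h | h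
  · simp [h]
  · simp [h]
  · simp [Nat.lt_asymm h, Nat.ne_of_gt h]
    intro hle
    exact absurd hle (Nat.not_le.mpr h)

-- the tail set contains t exactly when p ++ t is one of the ids
lemma mem_tails (ids : List String) (p t : String) :
    t ∈ PySem.Set.ofList ((ids.filter (fun s => PySem.Str.startswith s p)).map
        (fun s => PySem.Str.slice s (some (PySem.Str.len p)) none)) ↔ (p ++ t) ∈ ids := by
  rw [PySem.Set.mem_ofList, List.mem_map]
  constructor
  · rintro ⟨s, hs, rfl⟩
    rw [List.mem_filter] at hs
    obtain ⟨hmem, hpre⟩ := hs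
    rw [PySem.Str.startswith_eq, PySem.Chars.startswith_iff] at hpre
    have hslice : (PySem.Str.slice s (some (PySem.Str.len p)) none).toList
        = s.toList.drop p.toList.length := by
      rw [PySem.Str.toList_slice, PySem.Chars.slice_eq_listSlice, PySem.Str.len_eq,
          PySem.List.slice_from _ (by positivity)]
      simp
    have hs' : p.toList ++ s.toList.drop p.toList.length = s.toList :=
      List.prefix_iff_eq_append.mp hpre
    have : (p ++ PySem.Str.slice s (some (PySem.Str.len p)) none) = s := by
      rw [← String.toList_inj, String.toList_append, hslice, hs']
    rwa [this]
  · intro hmem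
    refine ⟨p ++ t, List.mem_filter.mpr ⟨hmem, ?_⟩, ?_⟩
    · rw [PySem.Str.startswith_eq, PySem.Chars.startswith_iff, String.toList_append]
      exact List.prefix_append _ _
    · rw [← String.toList_inj]
      rw [PySem.Str.toList_slice, PySem.Chars.slice_eq_listSlice, PySem.Str.len_eq,
          PySem.List.slice_from _ (by positivity), String.toList_append]
      simp

-- A's while loop returns the first candidate not among the ids
lemma nextLoopA_spec (ids : List String) (base : String) :
    ∀ (fuel : Nat) (i : Int) (k : Nat), k < fuel →
    ids.contains (base ++ "-" ++ PySem.Int.toStr (i + k)) = false →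
    (∀ j : Nat, j < k → ids.contains (base ++ "-" ++ PySem.Int.toStr (i + j)) = true) →
    nextLoopA ids base i fuel = base ++ "-" ++ PySem.Int.toStr (i + k) := by
  intro fuel
  induction fuel with
  | zero => intro i k hk; omega
  | succ fuel ih =>
    intro i k hk hfree hmin
    rw [nextLoopA]
    by_cases hc : ids.contains (base ++ "-" ++ PySem.Int.toStr i) = true
    · have hk0 : k ≠ 0 := by
        intro h0; subst h0
        rw [show i + ((0 : Nat) : Int) = i by simp, hc] at hfree
        simp at hfree
      simp only [if_pos hc]
      have := ih (i + 1) (k - 1) (by omega)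
        (by
          have : i + 1 + ((k - 1 : Nat) : Int) = i + k := by
            push_cast [Nat.cast_sub (by omega : 1 ≤ k)]; ring
          rw [this]; exact hfree)
        (by
          intro j hj
          have : i + 1 + (j : Int) = i + ((j + 1 : Nat) : Int) := by push_cast; ring
          rw [this]; exact hmin (j + 1) (by omega))
      rw [this]
      have : i + 1 + ((k - 1 : Nat) : Int) = i + k := by
        push_cast [Nat.cast_sub (by omega : 1 ≤ k)]; ring
      rw [this]
    · simp only [if_neg hc]
      have hk0 : k = 0 := by
        by_contra h0
        have h1 := hmin 0 (by omega)
        rw [show i + ((0 : Nat) : Int) = i by simp] at h1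
        exact hc h1
      subst hk0; simp

-- ===== VERDICT (by name: the statement is the Claim_ definition above) =====
theorem next_legend_id_py_spec : Claim_equal_next_legend_id_py := by
  intro ids suffix _
  unfold Spec_next_legend_id_py
  by_cases hc : ids.contains ("legend-" ++ suffix) = true
  · set base := "legend-" ++ suffix with hbase
    set p := base ++ "-" with hp
    set tailsSet : PySem.Set String :=
      PySem.Set.ofList ((ids.filter (fun s => PySem.Str.startswith s p)).map
        (fun s => PySem.Str.slice s (some (PySem.Str.len p)) none)) with htailsSet
    set tails : List String :=
      PySem.List.sorted2 tailsSet (fun t => PySem.Str.len t) (fun t => t) with htails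
    set r : Int :=
      tails.foldl (fun idx t => if t = PySem.Int.toStr idx then idx + 1 else idx) 1 with hr
    have hA : next_legend_id_py ids suffix = nextLoopA ids base 1 (ids.length + 1) := by
      unfold next_legend_id_py
      simp only [← hbase, hc, Bool.not_true, Bool.false_eq_true, if_false]
    have hB : next_legend_id_py_alt ids suffix = p ++ PySem.Int.toStr r := by
      unfold next_legend_id_py_alt
      simp only [← hbase, ← hp, ← htailsSet, ← htails, ← hr, hc, Bool.not_true,
        Bool.false_eq_true, if_false]
    rw [hA, hB]
    have hperm : tails.Perm tailsSet := by
      rw [htails, sorted2_eq_sorted_lex]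
      exact PySem.List.sorted_perm _ _ _
    have hbridge : ∀ m : Int, PySem.Int.toStr m ∈ tails ↔ (p ++ PySem.Int.toStr m) ∈ ids :=
      fun m => hperm.mem_iff.trans (mem_tails ids p _)
    have hple : tails.Pairwise (fun s t =>
        (toLex (PySem.Str.len s, s) : Lex (Int × String)) ≤ toLex (PySem.Str.len t, t)) := by
      rw [htails, sorted2_eq_sorted_lex]
      exact PySem.List.sorted_pairwise _ _
    have hnd : tails.Nodup := hperm.nodup_iff.mpr (PySem.Set.nodup_ofList _)
    have hP : tails.Pairwise (fun s t => ∀ a b : Int, 1 ≤ a → 1 ≤ b →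
        s = PySem.Int.toStr a → t = PySem.Int.toStr b → a < b) := by
      refine (hple.and hnd).imp ?_
      intro s t h a b ha hb hs ht
      obtain ⟨hle, hne⟩ := h
      subst hs; subst ht
      rcases lt_trichotomy a b with h' | h' | h'
      · exact h'
      · exact absurd (by rw [h']) hne
      · exact absurd (key_mono b a hb h') (not_lt.mpr hle)
    obtain ⟨h1, h2, h3⟩ := scan_props tails 1 (le_refl _) hP
      (by intro a ha hlt; exact absurd hlt (by omega))
    set k : Nat := (r - 1).toNat with hk
    have hkr : 1 + (k : Int) = r := by omega
    -- pigeonhole bound on the scan result: the k strings str(1), …, str(k) all lie in tails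
    have hbound : k ≤ tails.length := by
      have hnd' : ((List.range k).map (fun j : Nat => PySem.Int.toStr (1 + (j : Int)))).Nodup := by
        refine List.Nodup.map_on ?_ List.nodup_range
        intro x _ y _ hxy
        have := toStr_inj (by omega : (0:Int) ≤ 1 + x) (by omega : (0:Int) ≤ 1 + y) hxy
        omega
      have hsub : ((List.range k).map (fun j : Nat => PySem.Int.toStr (1 + (j : Int)))) ⊆ tails := by
        intro t ht
        rw [List.mem_map] at ht
        obtain ⟨j, hj, rfl⟩ := ht
        rw [List.mem_range] at hj
        exact h3 (1 + (j : Int)) (by omega) (by omega)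
      have := (hnd'.subperm hsub).length_le
      rwa [List.length_map, List.length_range] at this
    have htlen : tails.length ≤ ids.length := by
      rw [hperm.length_eq, htailsSet]
      calc (PySem.Set.ofList ((ids.filter (fun s => PySem.Str.startswith s p)).map
            (fun s => PySem.Str.slice s (some (PySem.Str.len p)) none))).length
          ≤ ((ids.filter (fun s => PySem.Str.startswith s p)).map
            (fun s => PySem.Str.slice s (some (PySem.Str.len p)) none)).length :=
              PySem.Set.length_ofList_le _
        _ ≤ ids.length := by rw [List.length_map]; exact List.length_filter_le _ _
    rw [nextLoopA_spec ids base (ids.length + 1) 1 k (by omega)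
        (by
          rw [hkr]
          have : ¬ (p ++ PySem.Int.toStr r) ∈ ids := fun hm => h2 ((hbridge r).mpr hm)
          exact Bool.eq_false_iff.mpr (fun hcon => this (List.contains_iff_mem.mp hcon)))
        (by
          intro j hj
          have : PySem.Int.toStr (1 + (j : Int)) ∈ tails := h3 (1 + j) (by omega) (by omega)
          exact List.contains_iff_mem.mpr ((hbridge _).mp this))]
    rw [hkr]
  · rw [Bool.not_eq_true] at hc
    unfold next_legend_id_py next_legend_id_py_alt
    simp only [hc, Bool.not_false, if_true]
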